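-- pv_equiv track=rewrite | github.com/dgmtsproject/dgmts-backend | services/micromate_service.py | _determine_alert_type
-- ===== SOURCE A (Python) =====
-- def _determine_alert_type(messages):
--     """Determine the highest priority alert type based on messages"""
--     # Check for shutdown threshold messages first (highest priority)
--     if any("Shutdown threshold reached" in msg for msg in messages):
--         return "shutdown"
--     # Check for warning threshold messages (medium priority)
--     elif any("Warning threshold reached" in msg for msg in messages):
--         return "warning"
--     # Check for alert threshold messages (lowest priority)
--     elif any("Alert threshold reached" in msg for msg in messages):
--         return "alert"
--     # Fallback to 'any' if we can't determine
--     return "any"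
-- ===== SOURCE B (Python) =====
-- def _determine_alert_type(messages):
--     """Single pass: accumulate flags, break early on shutdown, resolve by priority after the loop."""
--     warning = alert = False
--     for msg in messages:
--         if "Shutdown threshold reached" in msg:
--             return "shutdown"
--         if "Warning threshold reached" in msg:
--             warning = True
--         if "Alert threshold reached" in msg:
--             alert = True
--     if warning:
--         return "warning"
--     if alert:
--         return "alert"
--     return "any"
-- ===== Notes on version B (the rewrite author's own statement) =====
-- stated objective: simpler
-- what changed: Replaces A's three separate any()-scans over messages with one pass that returns 'shutdown' immediately and otherwise accumulates warning/alert flags, resolved by priority after the loop.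
import Mathlib
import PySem

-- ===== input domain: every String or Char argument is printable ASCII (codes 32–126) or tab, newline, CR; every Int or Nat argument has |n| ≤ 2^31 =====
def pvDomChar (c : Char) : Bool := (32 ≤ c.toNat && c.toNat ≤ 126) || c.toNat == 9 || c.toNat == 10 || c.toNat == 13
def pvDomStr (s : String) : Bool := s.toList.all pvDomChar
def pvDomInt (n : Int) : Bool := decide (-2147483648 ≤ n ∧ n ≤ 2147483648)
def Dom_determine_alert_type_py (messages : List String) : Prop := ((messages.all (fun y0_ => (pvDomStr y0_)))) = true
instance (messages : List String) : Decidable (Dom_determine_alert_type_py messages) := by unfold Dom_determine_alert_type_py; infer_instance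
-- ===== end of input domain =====

-- B replaces A's three separate any()-scans with one pass accumulating flags (simpler decomposition; same result).

-- ===== PORT A =====
def determine_alert_type_py (messages : List String) : String :=
  if messages.any (fun msg => PySem.Str.isIn "Shutdown threshold reached" msg) then "shutdown"
  else if messages.any (fun msg => PySem.Str.isIn "Warning threshold reached" msg) then "warning"
  else if messages.any (fun msg => PySem.Str.isIn "Alert threshold reached" msg) then "alert"
  else "any"

-- ===== PORT B =====
-- loop over messages carrying the warning/alert flags; returns immediately on a shutdown message
def altLoop : List String → Bool → Bool → String
  | [], warning, alert =>
    if warning then "warning" else if alert then "alert" else "any"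
  | msg :: rest, warning, alert =>
    if PySem.Str.isIn "Shutdown threshold reached" msg then "shutdown"
    else altLoop rest (warning || PySem.Str.isIn "Warning threshold reached" msg)
                      (alert || PySem.Str.isIn "Alert threshold reached" msg)

def determine_alert_type_py_alt (messages : List String) : String :=
  altLoop messages false false

-- ===== PRECONDITION & SPEC =====
def Spec_determine_alert_type_py (messages : List String) (out : String) : Prop := out = determine_alert_type_py_alt messages
instance (messages : List String) (out : String) : Decidable (Spec_determine_alert_type_py messages out) := by unfold Spec_determine_alert_type_py; infer_instance

-- ===== CLAIM (what is proved, stated in full; the proofs are below) =====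
def Claim_equal_determine_alert_type_py : Prop := ∀ (messages : List String), Dom_determine_alert_type_py messages → Spec_determine_alert_type_py messages (determine_alert_type_py messages)

-- ===== LEMMAS AND PROOFS =====

lemma altLoop_eq (ms : List String) (w a : Bool) :
    altLoop ms w a =
      if ms.any (fun msg => PySem.Str.isIn "Shutdown threshold reached" msg) then "shutdown"
      else if w || ms.any (fun msg => PySem.Str.isIn "Warning threshold reached" msg) then "warning"
      else if a || ms.any (fun msg => PySem.Str.isIn "Alert threshold reached" msg) then "alert"
      else "any" := by
  induction ms generalizing w a with
  | nil => simp [altLoop]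
  | cons m rest ih =>
    rw [altLoop]
    cases hs : PySem.Str.isIn "Shutdown threshold reached" m with
    | true =>
      simp only [List.any_cons, hs, Bool.true_or, reduceIte]
    | false =>
      rw [ih]
      cases hwm : PySem.Str.isIn "Warning threshold reached" m <;>
        cases ham : PySem.Str.isIn "Alert threshold reached" m <;>
        simp only [List.any_cons, hs, hwm, ham, Bool.false_or, Bool.true_or, Bool.or_true,
          Bool.or_assoc, Bool.false_eq_true, if_false, reduceIte]

-- ===== VERDICT (by name: the statement is the Claim_ definition above) =====
theorem determine_alert_type_py_spec : Claim_equal_determine_alert_type_py := by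
  intro messages _
  unfold Spec_determine_alert_type_py determine_alert_type_py determine_alert_type_py_alt
  rw [altLoop_eq]
  simp
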